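-- pv_equiv track=rewrite | github.com/TracyChacon/solving_problems | 2026_12_06_fcc_daily_vowelcase.py | vowel_case
-- ===== SOURCE A (Python) =====
-- def vowel_case(s: str) -> str:
--     vowels = ['a', 'e', 'i', 'o', 'u']
--     chars = list(s.lower())
--     vowel_upper = []
--
--     for char in chars:
--         if char not in vowels:
--             vowel_upper.append(char)
--         else:
--             vowel_upper.append(char.upper())
--
--     return "".join(vowel_upper)
-- ===== SOURCE B (Python) =====
-- def vowel_case(s: str) -> str:
--     out = s.lower()
--     for v in "aeiou":
--         out = out.replace(v, v.upper())
--     return out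
-- ===== Notes on version B (the rewrite author's own statement) =====
-- stated objective: simpler
-- what changed: Replaces the single per-character Python loop with vowel-membership test and list accumulator by a staged decomposition: lowercase the whole string once, then five whole-string str.replace passes, one per vowel, each running in C.
import Mathlib
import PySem

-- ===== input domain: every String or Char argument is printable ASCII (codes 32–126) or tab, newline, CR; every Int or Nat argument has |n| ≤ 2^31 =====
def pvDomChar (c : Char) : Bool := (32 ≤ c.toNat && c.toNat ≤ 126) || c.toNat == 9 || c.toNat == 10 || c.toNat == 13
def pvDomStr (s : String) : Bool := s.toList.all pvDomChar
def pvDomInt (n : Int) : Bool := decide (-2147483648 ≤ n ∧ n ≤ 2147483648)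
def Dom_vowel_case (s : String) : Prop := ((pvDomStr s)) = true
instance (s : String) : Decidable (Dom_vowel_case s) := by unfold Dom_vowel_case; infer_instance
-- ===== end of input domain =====

-- B is a staged decomposition: lowercase once, then five whole-string replace passes (one per vowel),
-- instead of A's single per-character loop with membership test and accumulator (simpler; return value only).

-- ===== PORT A =====
def vowel_case (s : String) : String :=
  let vowels : List Char := ['a', 'e', 'i', 'o', 'u']
  let chars : List Char := PySem.Chars.lower s.toList
  let vowel_upper : List Char := chars.foldl
    (fun acc char =>
      if ¬ (char ∈ vowels) then acc ++ [char]
      else acc ++ PySem.Chars.upper [char]) []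
  String.ofList vowel_upper

-- ===== PORT B =====
def vowel_case_alt (s : String) : String :=
  String.ofList (("aeiou".toList).foldl
    (fun out v => PySem.Chars.replace out [v] (PySem.Chars.upper [v]))
    (PySem.Chars.lower s.toList))

-- ===== PRECONDITION & SPEC =====
def Spec_vowel_case (s : String) (out : String) : Prop := out = vowel_case_alt s
instance (s : String) (out : String) : Decidable (Spec_vowel_case s out) := by unfold Spec_vowel_case; infer_instance

-- ===== CLAIM (what is proved, stated in full; the proofs are below) =====
def Claim_equal_vowel_case : Prop := ∀ (s : String), Dom_vowel_case s → Spec_vowel_case s (vowel_case s)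

-- ===== LEMMAS AND PROOFS =====

-- single-character substitution, the pointwise effect of one replace pass
def pvSub (v V c : Char) : Char := if c = v then V else c

lemma pv_go_single (v V : Char) (l acc : List Char) (fuel : Nat) (h : l.length ≤ fuel) :
    PySem.Chars.replace.go [v] [V] fuel l acc
      = acc.reverse ++ l.map (pvSub v V) := by
  induction l generalizing fuel acc with
  | nil =>
      cases fuel <;> simp [PySem.Chars.replace.go]
  | cons c t ih =>
      cases fuel with
      | zero => simp at h
      | succ f =>
          rw [PySem.Chars.replace.go]
          by_cases hc : c = v
          · subst hc
            have hpre : ([c] : List Char).isPrefixOf (c :: t) = true := by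
              simp [List.isPrefixOf]
            rw [if_pos hpre]
            simp only [List.length_cons, List.length_nil, Nat.zero_add, List.drop_succ_cons,
              List.drop_zero]
            rw [ih ([V].reverse ++ acc) f (Nat.le_of_succ_le_succ h)]
            simp [pvSub]
          · have hpre : ([v] : List Char).isPrefixOf (c :: t) = false := by
              simpa [List.isPrefixOf] using fun h : v = c => hc h.symm
            rw [hpre]
            simp only [Bool.false_eq_true, if_false]
            rw [ih (c :: acc) f (Nat.le_of_succ_le_succ h)]
            simp [pvSub, hc]

lemma pv_replace_single (v V : Char) (l : List Char) :
    PySem.Chars.replace l [v] [V] = l.map (pvSub v V) := by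
  rw [PySem.Chars.replace]
  simp only [List.isEmpty_cons, Bool.false_eq_true, if_false]
  simpa using pv_go_single v V l [] l.length le_rfl

-- pointwise: the five staged substitutions equal A's one-character branch
lemma pv_chain (c : Char) :
    pvSub 'u' 'U' (pvSub 'o' 'O' (pvSub 'i' 'I' (pvSub 'e' 'E' (pvSub 'a' 'A' c))))
      = (if ¬ (c ∈ (['a', 'e', 'i', 'o', 'u'] : List Char)) then ([c] : List Char)
         else PySem.Chars.upper [c]).headD c := by
  by_cases hc : c ∈ (['a', 'e', 'i', 'o', 'u'] : List Char)
  · simp only [List.mem_cons, List.not_mem_nil, or_false] at hc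
    rcases hc with h | h | h | h | h <;> subst h <;> decide
  · have hnot := hc
    simp only [List.mem_cons, List.not_mem_nil, or_false, not_or] at hnot
    obtain ⟨h1, h2, h3, h4, h5⟩ := hnot
    rw [if_pos hc]
    simp [pvSub, h1, h2, h3, h4, h5]

lemma pv_branch_singleton (c : Char) :
    (if ¬ (c ∈ (['a', 'e', 'i', 'o', 'u'] : List Char)) then ([c] : List Char)
     else PySem.Chars.upper [c]) =
    [(if ¬ (c ∈ (['a', 'e', 'i', 'o', 'u'] : List Char)) then ([c] : List Char)
      else PySem.Chars.upper [c]).headD c] := by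
  by_cases hc : c ∈ (['a', 'e', 'i', 'o', 'u'] : List Char)
  · simp only [List.mem_cons, List.not_mem_nil, or_false] at hc
    rcases hc with h | h | h | h | h <;> subst h <;> decide
  · simp [hc]

lemma pv_foldl_A (l acc : List Char) :
    l.foldl (fun acc char =>
      if ¬ (char ∈ (['a', 'e', 'i', 'o', 'u'] : List Char)) then acc ++ [char]
      else acc ++ PySem.Chars.upper [char]) acc
      = acc ++ l.map (fun c =>
          (if ¬ (c ∈ (['a', 'e', 'i', 'o', 'u'] : List Char)) then ([c] : List Char)
           else PySem.Chars.upper [c]).headD c) := by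
  induction l generalizing acc with
  | nil => simp
  | cons c t ih =>
      have hstep :
          (if ¬ (c ∈ (['a', 'e', 'i', 'o', 'u'] : List Char)) then acc ++ [c]
           else acc ++ PySem.Chars.upper [c])
          = acc ++ [(if ¬ (c ∈ (['a', 'e', 'i', 'o', 'u'] : List Char)) then ([c] : List Char)
                     else PySem.Chars.upper [c]).headD c] := by
        rw [← apply_ite (acc ++ ·), ← pv_branch_singleton]
      simp only [List.foldl_cons, List.map_cons, hstep, ih]
      simp

-- ===== VERDICT (by name: the statement is the Claim_ definition above) =====
theorem vowel_case_spec : Claim_equal_vowel_case := by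
  intro s _
  show vowel_case s = vowel_case_alt s
  unfold vowel_case vowel_case_alt
  show String.ofList ((PySem.Chars.lower s.toList).foldl
      (fun acc char =>
        if ¬ (char ∈ (['a', 'e', 'i', 'o', 'u'] : List Char)) then acc ++ [char]
        else acc ++ PySem.Chars.upper [char]) []) =
    String.ofList ((['a','e','i','o','u'] : List Char).foldl
      (fun out v => PySem.Chars.replace out [v] (PySem.Chars.upper [v]))
      (PySem.Chars.lower s.toList))
  rw [pv_foldl_A]
  simp only [List.nil_append]
  simp only [List.foldl_cons, List.foldl_nil]
  have ha : PySem.Chars.upper ['a'] = ['A'] := by decide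
  have he : PySem.Chars.upper ['e'] = ['E'] := by decide
  have hi : PySem.Chars.upper ['i'] = ['I'] := by decide
  have ho : PySem.Chars.upper ['o'] = ['O'] := by decide
  have hu : PySem.Chars.upper ['u'] = ['U'] := by decide
  rw [ha, he, hi, ho, hu,
    pv_replace_single, pv_replace_single, pv_replace_single, pv_replace_single, pv_replace_single]
  simp only [List.map_map]
  congr 1
  apply List.map_congr_left
  intro c _
  simpa [Function.comp] using (pv_chain c).symm
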